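-- pv_equiv track=rewrite | github.com/TannersAndRodents/caesar-cracker | src/decryptor.py | shift_mean_square_error
-- ===== SOURCE A (Python) =====
-- def shift_mean_square_error(l1_original, l2, offset):
--
--     l1 = []
--     for x in l1_original:
--         l1.append(x)
--
--     error = 0
--
--     for i in range(0, offset):
--         element = l1.pop()
--         l1.insert(0, element)
--
--     for entry1, entry2 in zip(l1, l2):
--         error += (entry1 - entry2)**2
--
--     return error
-- ===== SOURCE B (Python) =====
-- def shift_mean_square_error(l1_original, l2, offset):
--     n = len(l1_original)
--     if n == 0:
--         return 0
--     shift = offset % n if offset > 0 else 0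
--     return sum((l1_original[(i - shift) % n] - e) ** 2
--                for i, e in zip(range(n), l2))
-- ===== Notes on version B (the rewrite author's own statement) =====
-- stated objective: faster
-- what changed: A physically rotates a copy of the list with offset pop/insert(0) operations (each insert is O(n)) before summing squared differences; B never builds a rotated list and instead computes each rotated element's source index directly as (i - offset % n) % n in a single pass over zip(range(n), l2).
import Mathlib
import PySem

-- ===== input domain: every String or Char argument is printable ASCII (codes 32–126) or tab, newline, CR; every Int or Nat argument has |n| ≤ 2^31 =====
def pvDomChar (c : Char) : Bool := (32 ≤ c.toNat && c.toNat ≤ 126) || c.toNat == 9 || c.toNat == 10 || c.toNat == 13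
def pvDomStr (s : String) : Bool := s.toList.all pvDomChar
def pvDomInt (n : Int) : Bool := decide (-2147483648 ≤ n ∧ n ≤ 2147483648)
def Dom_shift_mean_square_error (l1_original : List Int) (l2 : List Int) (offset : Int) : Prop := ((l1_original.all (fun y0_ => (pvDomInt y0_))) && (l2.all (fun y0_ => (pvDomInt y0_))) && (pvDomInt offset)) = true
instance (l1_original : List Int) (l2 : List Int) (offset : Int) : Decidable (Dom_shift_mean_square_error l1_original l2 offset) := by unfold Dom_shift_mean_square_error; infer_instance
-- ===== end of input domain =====

-- B replaces A's offset-many pop/insert rotations (O(n*offset)) by a single pass that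
-- indexes the original list at (i - offset mod n) % n; a timing run measures the speed-up.

-- ===== PORT A =====
def shift_mean_square_error (l1_original : List Int) (l2 : List Int) (offset : Int) : Int :=
  -- l1 = []; for x in l1_original: l1.append(x)
  let l1 : List Int := l1_original.foldl (fun acc x => acc ++ [x]) []
  -- for i in range(0, offset): element = l1.pop(); l1.insert(0, element)
  let l1 : List Int := (PySem.List.pyRange 0 offset 1).foldl (fun l _ =>
      match PySem.List.pop? l (-1) with
      | some (element, rest) => PySem.List.insert rest 0 element
      | none => l) l1       -- none = pop from empty list: Python raises IndexError (outside Pre_)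
  -- for entry1, entry2 in zip(l1, l2): error += (entry1 - entry2)**2
  (l1.zip l2).foldl (fun error p => error + (p.1 - p.2) ^ 2) 0

-- ===== PORT B =====
def shift_mean_square_error_alt (l1_original : List Int) (l2 : List Int) (offset : Int) : Int :=
  let n : Int := l1_original.length
  if n = 0 then 0
  else
    let shift : Int := if 0 < offset then PySem.Int.mod offset n else 0
    ((PySem.List.pyRange 0 n 1).zip l2).foldl
      (fun acc p => acc + (PySem.List.pyGetD l1_original (PySem.Int.mod (p.1 - shift) n) 0 - p.2) ^ 2) 0

-- ===== PRECONDITION & SPEC =====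
-- Pre_ excludes exactly the inputs where A raises IndexError: empty l1_original with a positive
-- offset makes l1.pop() pop from an empty list.
def Pre_shift_mean_square_error (l1_original : List Int) (l2 : List Int) (offset : Int) : Prop :=
  l1_original ≠ [] ∨ offset ≤ 0
instance (l1_original : List Int) (l2 : List Int) (offset : Int) : Decidable (Pre_shift_mean_square_error l1_original l2 offset) := by unfold Pre_shift_mean_square_error; infer_instance

def pvWitness_shift_mean_square_error : List Int × List Int × Int := ([1, 2, 3], [4, 5], 2)

def Spec_shift_mean_square_error (l1_original : List Int) (l2 : List Int) (offset : Int) (out : Int) : Prop := out = shift_mean_square_error_alt l1_original l2 offset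
instance (l1_original : List Int) (l2 : List Int) (offset : Int) (out : Int) : Decidable (Spec_shift_mean_square_error l1_original l2 offset out) := by unfold Spec_shift_mean_square_error; infer_instance

-- ===== CLAIM (what is proved, stated in full; the proofs are below) =====
def Claim_equal_shift_mean_square_error : Prop := ∀ (l1_original : List Int) (l2 : List Int) (offset : Int), Dom_shift_mean_square_error l1_original l2 offset → Pre_shift_mean_square_error l1_original l2 offset → Spec_shift_mean_square_error l1_original l2 offset (shift_mean_square_error l1_original l2 offset)


-- ===== LEMMAS AND PROOFS =====

-- one Python iteration 'element = l1.pop(); l1.insert(0, element)' on a nonempty list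
-- is a right rotation, i.e. a left rotation by length - 1
lemma rot_step_eq (l : List Int) (h : l ≠ []) :
    (match PySem.List.pop? l (-1) with
      | some (element, rest) => PySem.List.insert rest 0 element
      | none => l) = l.rotate (l.length - 1) := by
  have hpop : PySem.List.pop? l (-1) = some (l.getLast h, l.dropLast) := by
    conv_lhs => rw [← List.dropLast_concat_getLast h]
    exact PySem.List.pop?_last _ _
  rw [hpop]
  show PySem.List.insert l.dropLast 0 (l.getLast h) = l.rotate (l.length - 1)
  rw [PySem.List.insert_zero, List.rotate_eq_drop_append_take (by omega),
      List.drop_length_sub_one h, ← List.dropLast_eq_take]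
  rfl

-- m iterations of the rotation step rotate left by m * (length - 1)
lemma rot_iter_eq (l : List Int) (h : l ≠ []) (m : Nat) :
    (List.range m).foldl (fun l' (_ : Nat) =>
      match PySem.List.pop? l' (-1) with
      | some (element, rest) => PySem.List.insert rest 0 element
      | none => l') l = l.rotate (m * (l.length - 1)) := by
  induction m with
  | zero => simp
  | succ m ih =>
      rw [List.range_succ, List.foldl_append, ih, List.foldl_cons, List.foldl_nil,
          rot_step_eq _ (by simp [List.rotate_eq_nil_iff, h]), List.length_rotate,
          List.rotate_rotate]
      ring_nf

-- the rotated element A reads at position i is the direct index B reads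
lemma index_eq (l1 : List Int) (offset : Int) (i : Nat)
    (hn : l1 ≠ []) :
    PySem.List.pyGetD l1
        (PySem.Int.mod ((0 + (i : Int)) -
          (if 0 < offset then PySem.Int.mod offset (l1.length : Int) else 0)) (l1.length : Int)) 0
      = l1[(i + offset.toNat * (l1.length - 1)) % l1.length]'
          (by exact Nat.mod_lt _ (List.length_pos_of_ne_nil hn)) := by
  have hn0 : 0 < l1.length := List.length_pos_of_ne_nil hn
  have hnz : (0 : Int) < (l1.length : Int) := by exact_mod_cast hn0
  set s : Int := if 0 < offset then PySem.Int.mod offset (l1.length : Int) else 0 with hs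
  have hpos : PySem.Int.mod ((0 + (i : Int)) - s) (l1.length : Int)
      = ((0 + (i : Int)) - s) % (l1.length : Int) := PySem.Int.mod_eq_emod_of_pos hnz
  have key : ((0 + (i : Int)) - s) % (l1.length : Int)
      = (((i + offset.toNat * (l1.length - 1)) % l1.length : Nat) : Int) := by
    have hcast : (((i + offset.toNat * (l1.length - 1)) % l1.length : Nat) : Int)
        = (((i : Int) + (offset.toNat : Int) * ((l1.length : Int) - 1)) % (l1.length : Int)) := by
      push_cast [Nat.cast_sub (by omega : 1 ≤ l1.length)]
      ring_nf
    rw [hcast]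
    have expand : (i : Int) + (offset.toNat : Int) * ((l1.length : Int) - 1)
        = ((i : Int) - (offset.toNat : Int)) + (offset.toNat : Int) * (l1.length : Int) := by ring
    rw [expand, Int.add_mul_emod_self_right, zero_add]
    by_cases hoff : 0 < offset
    · have hto : (offset.toNat : Int) = offset := Int.toNat_of_nonneg (le_of_lt hoff)
      rw [hto, hs, if_pos hoff, PySem.Int.mod_eq_emod_of_pos hnz,
          Int.sub_emod (i : Int) (offset % (l1.length : Int)),
          Int.emod_emod_of_dvd offset (dvd_refl _), ← Int.sub_emod]
    · have hto : (offset.toNat : Int) = 0 := by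
        simp [Int.toNat_of_nonpos (by omega : offset ≤ 0)]
      rw [hto, hs, if_neg hoff]
  rw [hpos, key, PySem.List.pyGetD_eq_getElem _ _ (by positivity) (by
      exact_mod_cast Nat.mod_lt _ hn0)]
  simp only [Int.toNat_natCast]

-- the list B folds over, mapped through B's body, is exactly the rotated zip A folds over
lemma zip_map_eq (l1 : List Int) (l2 : List Int) (offset : Int) (hn : l1 ≠ []) :
    ((PySem.List.pyRange 0 (l1.length : Int) 1).zip l2).map
        (fun p => (PySem.List.pyGetD l1
          (PySem.Int.mod (p.1 - (if 0 < offset then PySem.Int.mod offset (l1.length : Int) else 0))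
            (l1.length : Int)) 0, p.2))
      = (l1.rotate (offset.toNat * (l1.length - 1))).zip l2 := by
  have hlen : (PySem.List.pyRange 0 (l1.length : Int) 1).length = l1.length := by
    simp [PySem.List.pyRange_one]
  apply List.ext_getElem
  · simp [List.length_zip, hlen]
  · intro i h1 h2
    have hiz : i < (PySem.List.pyRange 0 (l1.length : Int) 1).length := by
      simp [List.length_zip] at h1 ⊢; omega
    have hil : i < l1.length := by rw [hlen] at hiz; exact hiz
    simp only [List.getElem_map, List.getElem_zip, PySem.List.pyRange_one, List.getElem_map,
      List.getElem_range, List.getElem_rotate]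
    exact Prod.ext (index_eq l1 offset i hn) rfl

lemma A_eq_B (l1_original : List Int) (l2 : List Int) (offset : Int)
    (hpre : Pre_shift_mean_square_error l1_original l2 offset) :
    shift_mean_square_error l1_original l2 offset
      = shift_mean_square_error_alt l1_original l2 offset := by
  simp only [shift_mean_square_error, shift_mean_square_error_alt]
  rw [PySem.List.foldl_append_singleton, List.nil_append]
  by_cases hn : l1_original = []
  · -- l1 empty: Pre_ forces offset ≤ 0 so no rotation happens; both sides are 0
    have hoff : offset ≤ 0 := by
      rcases hpre with h | h
      · exact absurd hn h
      · exact h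
    subst hn
    simp [PySem.List.pyRange_one_eq_nil hoff]
  · have hn0 : l1_original.length ≠ 0 := by simp [hn]
    rw [if_neg (by exact_mod_cast hn0)]
    rw [PySem.List.pyRange_one 0 offset, List.foldl_map,
        rot_iter_eq _ hn ((offset - 0).toNat),
        show (offset - 0).toNat = offset.toNat by omega,
        ← zip_map_eq _ _ _ hn, List.foldl_map]

-- ===== VERDICT (by name: the statement is the Claim_ definition above) =====
theorem shift_mean_square_error_spec : Claim_equal_shift_mean_square_error := by
  intro l1 l2 off _ hpre
  unfold Spec_shift_mean_square_error
  exact A_eq_B l1 l2 off hpre
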